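-- pv_equiv track=rewrite | github.com/steelwolf180/SparkPY | IDP_camp.py | solve
-- ===== SOURCE A (Python) =====
-- cache = {}
--
-- def total_value(items, max_weight):
--     return sum([x[2] for x in items]) if sum([x[1] for x in items]) < max_weight else 0
--
-- def solve(items, max_weight):
--     if not items:
--         return ()
--     if (items, max_weight) not in cache:
--         head = items[0]
--         tail = items[1:]
--         include = (head,) + solve(tail, max_weight - head[1])
--         dont_include = solve(tail, max_weight)
--         if total_value(include, max_weight) > total_value(dont_include, max_weight):
--             answer = include
--         else:
--             answer = dont_include
--         cache[(items, max_weight)] = answer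
--     return cache[(items, max_weight)]
-- ===== SOURCE B (Python) =====
-- def solve(items, max_weight):
--     # One memoized pass keyed by (index, remaining weight); each sub-result
--     # carries its accumulated weight/value, and selections are shared cons
--     # chains, so nothing is rescanned or copied per state.
--     memo = {}
--     n = len(items)
--
--     def go(i, mw):
--         if i == n:
--             return (None, 0, 0)
--         key = (i, mw)
--         r = memo.get(key)
--         if r is None:
--             head = items[i]
--             c1, w1, v1 = go(i + 1, mw - head[1])
--             iw = w1 + head[1]
--             iv = v1 + head[2]
--             c2, w2, v2 = go(i + 1, mw)
--             if (iv if iw < mw else 0) > (v2 if w2 < mw else 0):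
--                 r = ((head, c1), iw, iv)
--             else:
--                 r = (c2, w2, v2)
--             memo[key] = r
--         return r
--
--     chain = go(0, max_weight)[0]
--     out = []
--     while chain is not None:
--         out.append(chain[0])
--         chain = chain[1]
--     return tuple(out)
-- ===== Notes on version B (the rewrite author's own statement) =====
-- stated objective: faster
-- what changed: B replaces A's rescan-and-copy recursion (slicing the tuple, rebuilding selections with tuple concatenation, and re-summing weights/values via total_value at every state) with an index-based memoized recursion that carries the accumulated weight and value of each sub-result and shares selections as cons chains, doing O(1) work per state.
import Mathlib
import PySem

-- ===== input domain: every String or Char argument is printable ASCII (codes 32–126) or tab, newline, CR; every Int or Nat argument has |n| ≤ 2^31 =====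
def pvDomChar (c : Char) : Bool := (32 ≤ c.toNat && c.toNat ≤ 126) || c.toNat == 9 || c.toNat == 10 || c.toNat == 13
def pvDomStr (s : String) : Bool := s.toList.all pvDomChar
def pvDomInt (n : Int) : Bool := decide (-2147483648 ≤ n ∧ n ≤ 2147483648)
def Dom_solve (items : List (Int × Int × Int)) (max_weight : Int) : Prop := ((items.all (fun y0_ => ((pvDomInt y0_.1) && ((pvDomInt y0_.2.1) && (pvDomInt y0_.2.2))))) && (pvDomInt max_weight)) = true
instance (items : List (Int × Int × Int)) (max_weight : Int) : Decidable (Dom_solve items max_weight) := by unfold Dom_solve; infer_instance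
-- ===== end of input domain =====

-- B memoizes by (index, remaining weight) and carries accumulated weight/value with
-- each sub-result (shared cons chains) instead of rescanning/copying the tuple per
-- state; the cache of A is pure memoization, so both ports are the plain recursion.

-- ===== PORT A =====
-- total_value(items, max_weight)
def total_value (items : List (Int × Int × Int)) (max_weight : Int) : Int :=
  if (items.map (fun x => x.2.1)).sum < max_weight then (items.map (fun x => x.2.2)).sum else 0

-- solve: the cache is transparent (pure memoization keyed on both arguments), so the
-- port is the recursion it memoizes, step for step.
def solve (items : List (Int × Int × Int)) (max_weight : Int) : List (Int × Int × Int) :=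
  match items with
  | [] => []
  | head :: tail =>
    let include_ := head :: solve tail (max_weight - head.2.1)
    let dont_include := solve tail max_weight
    if total_value include_ max_weight > total_value dont_include max_weight then include_
    else dont_include

-- ===== PORT B =====
-- selections are shared cons chains (Python: nested pairs ending in None)
inductive PChain where
  | nil : PChain
  | cons : (Int × Int × Int) → PChain → PChain
deriving DecidableEq, Repr

-- go(i, mw): recursion over the suffix of items (memo is transparent); returns
-- (selection chain, accumulated weight, accumulated value)
def solveGo (items : List (Int × Int × Int)) (mw : Int) : PChain × Int × Int :=
  match items with
  | [] => (.nil, 0, 0)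
  | head :: t =>
    let r1 := solveGo t (mw - head.2.1)
    let iw := r1.2.1 + head.2.1
    let iv := r1.2.2 + head.2.2
    let r2 := solveGo t mw
    if (if iw < mw then iv else 0) > (if r2.2.1 < mw then r2.2.2 else 0) then
      (.cons head r1.1, iw, iv)
    else r2

-- the final while loop materialising the chain front-to-back
def chainToList (c : PChain) : List (Int × Int × Int) :=
  match c with
  | .nil => []
  | .cons h rest => h :: chainToList rest

def solve_alt (items : List (Int × Int × Int)) (max_weight : Int) : List (Int × Int × Int) :=
  chainToList (solveGo items max_weight).1

-- ===== PRECONDITION & SPEC =====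
def Spec_solve (items : List (Int × Int × Int)) (max_weight : Int) (out : List (Int × Int × Int)) : Prop := out = solve_alt items max_weight
instance (items : List (Int × Int × Int)) (max_weight : Int) (out : List (Int × Int × Int)) : Decidable (Spec_solve items max_weight out) := by unfold Spec_solve; infer_instance

-- ===== CLAIM (what is proved, stated in full; the proofs are below) =====
def Claim_equal_solve : Prop := ∀ (items : List (Int × Int × Int)) (max_weight : Int), Dom_solve items max_weight → Spec_solve items max_weight (solve items max_weight)

-- ===== LEMMAS AND PROOFS =====
def toChain (l : List (Int × Int × Int)) : PChain :=
  match l with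
  | [] => .nil
  | h :: t => .cons h (toChain t)

theorem chainToList_toChain (l : List (Int × Int × Int)) : chainToList (toChain l) = l := by
  induction l with
  | nil => rfl
  | cons h t ih => simp [toChain, chainToList, ih]

theorem solveGo_eq (items : List (Int × Int × Int)) (mw : Int) :
    solveGo items mw =
      (toChain (solve items mw),
       ((solve items mw).map (fun x => x.2.1)).sum,
       ((solve items mw).map (fun x => x.2.2)).sum) := by
  induction items generalizing mw with
  | nil => rfl
  | cons head t ih =>
    simp only [solveGo, solve, ih, total_value]
    have hw : ((head :: solve t (mw - head.2.1)).map (fun x => x.2.1)).sum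
        = ((solve t (mw - head.2.1)).map (fun x => x.2.1)).sum + head.2.1 := by
      simp [add_comm]
    have hv : ((head :: solve t (mw - head.2.1)).map (fun x => x.2.2)).sum
        = ((solve t (mw - head.2.1)).map (fun x => x.2.2)).sum + head.2.2 := by
      simp [add_comm]
    rw [← hw, ← hv]
    split_ifs with h1 h2 h3 <;> simp_all [toChain]

-- ===== VERDICT (by name: the statement is the Claim_ definition above) =====
theorem solve_spec : Claim_equal_solve := by
  intro items mw _
  unfold Spec_solve solve_alt
  rw [solveGo_eq, chainToList_toChain]
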